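-- pv_equiv track=rewrite | github.com/jaligon/auto-xFS | web_app/app.py | create_metrics_options
-- ===== SOURCE A (Python) =====
-- metrics_map = {
-- 	"retention rate": ["retention rate"],
-- 	"accuracy": ["accuracy", "r2"],
-- 	"mean absolute error": ["mae"],
-- 	"root mean square error": ["rmse"],
-- 	"explanation similarity": ["kendalltau", "relative influence changes", "RI", "RIA"],
-- 	"explanation discernibility": ["dcor"]
-- }
--
-- def create_metrics_options(metrics_list: list = ["retention rate", "accuracy", "r2", "mae", "rmse", "kendalltau",
--                                                  "relative influence changes", "RI", "RIA", "dcor"]):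
-- 	metrics_options = []
-- 	for metric in metrics_list:
-- 		for k, v in metrics_map.items():
-- 			if metric in v:
-- 				option = {"label": f"{k} ({metric})", "value": metric}
-- 				metrics_options.append(option)
-- 				break
-- 	return metrics_options
-- ===== SOURCE B (Python) =====
-- metrics_map = {
-- 	"retention rate": ["retention rate"],
-- 	"accuracy": ["accuracy", "r2"],
-- 	"mean absolute error": ["mae"],
-- 	"root mean square error": ["rmse"],
-- 	"explanation similarity": ["kendalltau", "relative influence changes", "RI", "RIA"],
-- 	"explanation discernibility": ["dcor"]
-- }
--
-- def create_metrics_options(metrics_list: list = ["retention rate", "accuracy", "r2", "mae", "rmse", "kendalltau",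
--                                                  "relative influence changes", "RI", "RIA", "dcor"]):
-- 	index = {}
-- 	for k, v in metrics_map.items():
-- 		for m in v:
-- 			index[m] = k
-- 	return [{"label": f"{index[metric]} ({metric})", "value": metric}
-- 	        for metric in metrics_list if metric in index]
-- ===== Notes on version B (the rewrite author's own statement) =====
-- stated objective: faster
-- what changed: B precomputes a reverse metric->label dict once and builds the result in a single comprehension with direct lookups, eliminating A's per-metric inner scan over metrics_map with break.
import Mathlib
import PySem

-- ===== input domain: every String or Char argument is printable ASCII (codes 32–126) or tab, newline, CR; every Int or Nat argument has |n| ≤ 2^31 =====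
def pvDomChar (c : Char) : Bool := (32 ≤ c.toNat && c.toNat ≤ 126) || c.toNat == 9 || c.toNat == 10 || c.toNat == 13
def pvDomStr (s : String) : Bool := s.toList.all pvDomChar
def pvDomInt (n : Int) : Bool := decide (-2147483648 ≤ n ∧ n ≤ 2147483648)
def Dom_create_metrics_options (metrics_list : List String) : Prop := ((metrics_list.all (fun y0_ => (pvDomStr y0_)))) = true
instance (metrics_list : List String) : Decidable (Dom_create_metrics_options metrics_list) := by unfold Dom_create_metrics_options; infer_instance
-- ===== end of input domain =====

-- B builds a reverse metric->label index once and does direct lookups (idiomatic; removes A's inner scan with break).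


-- ===== PORT A =====
def pvMetricsMap : List (String × List String) :=
  [("retention rate", ["retention rate"]),
   ("accuracy", ["accuracy", "r2"]),
   ("mean absolute error", ["mae"]),
   ("root mean square error", ["rmse"]),
   ("explanation similarity", ["kendalltau", "relative influence changes", "RI", "RIA"]),
   ("explanation discernibility", ["dcor"])]

-- inner 'for k, v in metrics_map.items(): if metric in v: …; break' = first matching key
def pvScanMap (metric : String) : List (String × List String) → Option String
  | [] => none
  | (k, v) :: rest => if v.contains metric then some k else pvScanMap metric rest

def create_metrics_options (metrics_list : List String) : List (List (String × String)) :=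
  metrics_list.foldl (fun acc metric =>
    match pvScanMap metric pvMetricsMap with
    | some k => acc ++ [[("label", k ++ " (" ++ metric ++ ")"), ("value", metric)]]
    | none => acc) []

-- ===== PORT B =====
-- index[m] = k for each k and each m in metrics_map[k]
def pvIndex : PySem.Dict String String :=
  pvMetricsMap.foldl (fun d kv => kv.2.foldl (fun d m => d.insert m kv.1) d) PySem.Dict.empty

-- the comprehension: keep metrics with an index entry, format via direct lookup
def create_metrics_options_alt (metrics_list : List String) : List (List (String × String)) :=
  metrics_list.filterMap (fun metric =>
    match pvIndex.get? metric with
    | some k => some [("label", k ++ " (" ++ metric ++ ")"), ("value", metric)]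
    | none => none)

-- ===== PRECONDITION & SPEC =====
def Spec_create_metrics_options (metrics_list : List String) (out : List (List (String × String))) : Prop := out = create_metrics_options_alt metrics_list
instance (metrics_list : List String) (out : List (List (String × String))) : Decidable (Spec_create_metrics_options metrics_list out) := by unfold Spec_create_metrics_options; infer_instance

-- ===== CLAIM (what is proved, stated in full; the proofs are below) =====
def Claim_equal_create_metrics_options : Prop := ∀ (metrics_list : List String), Dom_create_metrics_options metrics_list → Spec_create_metrics_options metrics_list (create_metrics_options metrics_list)

-- ===== LEMMAS AND PROOFS =====

-- The scan over the literal map and the lookup in the precomputed index agree for every metric.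
theorem pvScan_eq_index (m : String) : pvScanMap m pvMetricsMap = pvIndex.get? m := by
  have hidx : pvIndex = PySem.Dict.mk
      [("retention rate", "retention rate"), ("accuracy", "accuracy"), ("r2", "accuracy"),
       ("mae", "mean absolute error"), ("rmse", "root mean square error"),
       ("kendalltau", "explanation similarity"), ("relative influence changes", "explanation similarity"),
       ("RI", "explanation similarity"), ("RIA", "explanation similarity"),
       ("dcor", "explanation discernibility")] := by rfl
  have hc : ∀ a b : String, (a == b) = (b == a) := fun a b => by
    cases h : a == b <;> cases h' : b == a <;> simp only [beq_iff_eq, beq_eq_false_iff_ne] at h h' <;> simp_all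
  rw [hidx]
  simp only [pvScanMap, pvMetricsMap, List.contains_cons, List.elem_nil,
    PySem.Dict.get?, Bool.or_false, hc m]
  split_ifs <;> simp_all <;> aesop

-- loop invariant: A's foldl with a running accumulator equals acc ++ B's comprehension
theorem pv_aux (l : List String) (acc : List (List (String × String))) :
    l.foldl (fun acc metric =>
      match pvScanMap metric pvMetricsMap with
      | some k => acc ++ [[("label", k ++ " (" ++ metric ++ ")"), ("value", metric)]]
      | none => acc) acc
    = acc ++ l.filterMap (fun metric =>
      match pvIndex.get? metric with
      | some k => some [("label", k ++ " (" ++ metric ++ ")"), ("value", metric)]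
      | none => none) := by
  induction l generalizing acc with
  | nil => simp
  | cons a t ih =>
    simp only [List.foldl_cons, List.filterMap_cons]
    rw [pvScan_eq_index a]
    cases h : pvIndex.get? a <;> simp [ih]

-- ===== VERDICT (by name: the statement is the Claim_ definition above) =====
theorem create_metrics_options_spec : Claim_equal_create_metrics_options := by
  intro metrics_list _
  unfold Spec_create_metrics_options create_metrics_options create_metrics_options_alt
  simpa using pv_aux metrics_list []
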